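-- pv_equiv track=rewrite | github.com/ssoso27/Smoothie2 | pythAlgo/programmers/monthly_code_cahllenges/3/03_2.py | is_star
-- ===== SOURCE A (Python) =====
-- def is_star(lst):
--     if len(lst) == 2:
--         return True
--
--     # 교집합이라고 가정
--     commons = lst[0:2]
--
--     for i in range(0, len(lst), 2):
--         # 각 집합 내의 숫자가 겹치는지 검사
--         if lst[i] == lst[i+1]:
--             return False
--
--         # 교집합 검사
--         if len(commons) == 2:
--             if not (commons[1] == lst[i] or commons[1] == lst[i+1]):
--                 commons.pop(1)
--             if not (commons[0] == lst[i] or commons[0] == lst[i+1]):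
--                 commons.pop(0)
--
--             if len(commons) == 0:
--                 return False
--         else:
--             if commons[0] != lst[i] and commons[0] != lst[i+1]:
--                 return False
--
--     return True
-- ===== SOURCE B (Python) =====
-- def is_star(lst):
--     # Declarative: build the pair list once, then check the two global conditions.
--     if len(lst) <= 2:
--         return True
--     pairs = [(lst[i], lst[i + 1]) for i in range(0, len(lst), 2)]
--     if any(a == b for a, b in pairs):
--         return False
--     return any(all(c == a or c == b for a, b in pairs) for c in lst[:2])
-- ===== Notes on version B (the rewrite author's own statement) =====
-- stated objective: simpler
-- what changed: Replaces A's stateful loop that mutates a 'commons' candidate list with two-way length branching and pops by a declarative formulation: build the pair list once, return False if any pair repeats an element, else test whether one of the first two elements occurs in every pair.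
-- outside the precondition, e.g. on is_star([1, 1, 2]): A returns False, B raises IndexError
import Mathlib
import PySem

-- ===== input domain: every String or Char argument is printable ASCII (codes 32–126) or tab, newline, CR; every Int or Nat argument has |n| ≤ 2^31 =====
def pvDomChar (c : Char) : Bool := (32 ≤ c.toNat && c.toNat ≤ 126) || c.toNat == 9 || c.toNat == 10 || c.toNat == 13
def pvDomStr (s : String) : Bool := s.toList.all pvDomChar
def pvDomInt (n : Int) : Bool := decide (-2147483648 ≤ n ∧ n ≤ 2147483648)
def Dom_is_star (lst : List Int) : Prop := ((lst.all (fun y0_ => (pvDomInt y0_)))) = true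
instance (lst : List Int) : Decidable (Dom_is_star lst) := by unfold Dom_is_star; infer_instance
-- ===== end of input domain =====

-- B replaces A's stateful candidate-narrowing loop by a declarative two-pass check; objective: simpler.


-- ===== PORT A =====
-- loop 'for i in range(0, len(lst), 2)' with mutable local 'commons'; early 'return False' = returning false.
-- lst[i] / lst[i+1] via pyGet? (none = IndexError; the 'none' branch returns false, reached only outside Pre_).
-- commons[1] / commons[0] are always in range in Python (length 2 resp. ≥ 1 at those reads); ported as getD over the same index.
-- commons.pop(1) / commons.pop(0) = eraseIdx at that index.
def isStarGo (lst : List Int) : List Int → List Int → Bool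
  | [], _ => true
  | i :: rest, commons =>
    match PySem.List.pyGet? lst i, PySem.List.pyGet? lst (i + 1) with
    | some a, some b =>
      if a == b then false
      else if commons.length == 2 then
        let commons1 := if !(commons.getD 1 0 == a || commons.getD 1 0 == b) then commons.eraseIdx 1 else commons
        let commons2 := if !(commons1.getD 0 0 == a || commons1.getD 0 0 == b) then commons1.eraseIdx 0 else commons1
        if commons2.length == 0 then false else isStarGo lst rest commons2
      else
        if commons.getD 0 0 != a && commons.getD 0 0 != b then false else isStarGo lst rest commons
    | _, _ => false   -- IndexError in Python (odd length); outside Pre_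

def is_star (lst : List Int) : Bool :=
  if lst.length == 2 then true
  else isStarGo lst (PySem.List.pyRange 0 lst.length 2) (PySem.List.slice lst (some 0) (some 2))

-- ===== PORT B =====
-- Source B: build the pair list once, then two declarative passes (any duplicate pair; any of lst[:2] in every pair).
-- lst[i] / lst[i+1] via pyGet? with default 0 (in range for every even-length list, i.e. inside Pre_).
def altPairs (lst : List Int) : List (Int × Int) :=
  (PySem.List.pyRange 0 lst.length 2).map
    (fun i => ((PySem.List.pyGet? lst i).getD 0, (PySem.List.pyGet? lst (i + 1)).getD 0))

def is_star_alt (lst : List Int) : Bool :=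
  if lst.length ≤ 2 then true
  else if (altPairs lst).any (fun p => p.1 == p.2) then false
  else (PySem.List.slice lst (some 0) (some 2)).any
    (fun c => (altPairs lst).all (fun p => c == p.1 || c == p.2))

-- ===== PRECONDITION & SPEC =====
-- Pre_ excludes odd-length lists: on them A raises IndexError at the incomplete final pair, except when an
-- earlier duplicated pair makes A return False first — and on those B raises IndexError while building its pair list.
def Pre_is_star (lst : List Int) : Prop := lst.length % 2 = 0
instance (lst : List Int) : Decidable (Pre_is_star lst) := by unfold Pre_is_star; infer_instance
def pvWitness_is_star : List Int := [1, 2, 2, 3, 3, 1]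
def Spec_is_star (lst : List Int) (out : Bool) : Prop := out = is_star_alt lst
instance (lst : List Int) (out : Bool) : Decidable (Spec_is_star lst out) := by unfold Spec_is_star; infer_instance

-- ===== CLAIM (what is proved, stated in full; the proofs are below) =====
def Claim_equal_is_star : Prop := ∀ (lst : List Int), Dom_is_star lst → Pre_is_star lst → Spec_is_star lst (is_star lst)

-- ===== LEMMAS AND PROOFS =====

-- the pair read at index i, with B's defaults
def pairAt (lst : List Int) (i : Int) : Int × Int :=
  ((PySem.List.pyGet? lst i).getD 0, (PySem.List.pyGet? lst (i + 1)).getD 0)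

-- Main loop characterisation: when every index of idxs (and its successor) is in range and commons has
-- length 1 or 2, A's loop computes "no pair duplicated and some candidate occurs in every pair".
theorem isStarGo_eq (lst : List Int) (idxs : List Int) (commons : List Int)
    (hidx : ∀ i ∈ idxs, (PySem.List.pyGet? lst i).isSome ∧ (PySem.List.pyGet? lst (i + 1)).isSome)
    (hc : commons.length = 1 ∨ commons.length = 2) :
    isStarGo lst idxs commons =
      ((idxs.map (pairAt lst)).all (fun p => !(p.1 == p.2)) &&
        commons.any (fun c => (idxs.map (pairAt lst)).all (fun p => c == p.1 || c == p.2))) := by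
  induction idxs generalizing commons with
  | nil =>
    rcases hc with h | h <;>
      (cases commons with
       | nil => simp at h
       | cons c cs => simp [isStarGo])
  | cons i rest ih =>
    obtain ⟨ha', hb'⟩ := hidx i (by simp)
    obtain ⟨a, ha⟩ := Option.isSome_iff_exists.mp ha'
    obtain ⟨b, hb⟩ := Option.isSome_iff_exists.mp hb'
    have hidx' : ∀ j ∈ rest, (PySem.List.pyGet? lst j).isSome ∧ (PySem.List.pyGet? lst (j + 1)).isSome :=
      fun j hj => hidx j (by simp [hj])
    have hpair : pairAt lst i = (a, b) := by simp [pairAt, ha, hb]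
    by_cases hab : a = b
    · subst hab
      simp [isStarGo, ha, hb, List.map_cons, hpair]
    · have hab' : (a == b) = false := by simp [hab]
      rcases hc with h1 | h2
      · -- commons = [c0]
        obtain ⟨c0, rfl⟩ : ∃ c0, commons = [c0] := by
          match commons, h1 with
          | [c0], _ => exact ⟨c0, rfl⟩
        cases hm0 : (c0 == a || c0 == b) with
        | true =>
          have hcond : ((c0 != a) && (c0 != b)) = false := by
            simp only [bne, ← Bool.not_or, hm0, Bool.not_true]
          have hgo : isStarGo lst (i :: rest) [c0] = isStarGo lst rest [c0] := by
            simp only [isStarGo, ha, hb]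
            simp [hab', hcond]
          rw [hgo, ih [c0] hidx' (Or.inl rfl)]
          simp [List.map_cons, hpair, hab', hm0]
        | false =>
          have hcond : ((c0 != a) && (c0 != b)) = true := by
            simp only [bne, ← Bool.not_or, hm0, Bool.not_false]
          have hgo : isStarGo lst (i :: rest) [c0] = false := by
            simp only [isStarGo, ha, hb]
            simp [hab', hcond]
          rw [hgo]
          simp [List.map_cons, hpair, hab', hm0]
      · -- commons = [c0, c1]
        obtain ⟨c0, c1, rfl⟩ : ∃ c0 c1, commons = [c0, c1] := by
          match commons, h2 with
          | [c0, c1], _ => exact ⟨c0, c1, rfl⟩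
        cases hm1 : (c1 == a || c1 == b) with
        | true =>
          cases hm0 : (c0 == a || c0 == b) with
          | true =>
            have hgo : isStarGo lst (i :: rest) [c0, c1] = isStarGo lst rest [c0, c1] := by
              simp only [isStarGo, ha, hb]
              simp [hab', hm0, hm1]
            rw [hgo, ih [c0, c1] hidx' (Or.inr rfl)]
            simp [List.map_cons, hpair, hab', hm0, hm1, Bool.and_or_distrib_left]
          | false =>
            have hgo : isStarGo lst (i :: rest) [c0, c1] = isStarGo lst rest [c1] := by
              simp only [isStarGo, ha, hb]
              simp [hab', hm0, hm1]
            rw [hgo, ih [c1] hidx' (Or.inl rfl)]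
            simp [List.map_cons, hpair, hab', hm0, hm1]
        | false =>
          cases hm0 : (c0 == a || c0 == b) with
          | true =>
            have hgo : isStarGo lst (i :: rest) [c0, c1] = isStarGo lst rest [c0] := by
              simp only [isStarGo, ha, hb]
              simp [hab', hm0, hm1]
            rw [hgo, ih [c0] hidx' (Or.inl rfl)]
            simp [List.map_cons, hpair, hab', hm0, hm1]
          | false =>
            have hgo : isStarGo lst (i :: rest) [c0, c1] = false := by
              simp only [isStarGo, ha, hb]
              simp [hab', hm0, hm1]
            rw [hgo]
            simp [List.map_cons, hpair, hab', hm0, hm1]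

-- every index of range(0, len, 2) and its successor is in range when the length is even
theorem hidx_of_even (lst : List Int) (h : lst.length % 2 = 0) :
    ∀ i ∈ PySem.List.pyRange 0 (lst.length) 2,
      (PySem.List.pyGet? lst i).isSome ∧ (PySem.List.pyGet? lst (i + 1)).isSome := by
  intro i hi
  rw [PySem.List.mem_pyRange_iff_of_pos (by norm_num)] at hi
  obtain ⟨h0, hlt, k, hk⟩ := hi
  have h1 : i + 1 < (lst.length : Int) := by omega
  constructor
  · rw [PySem.List.pyGet?_of_nonneg lst (by omega)]
    rw [List.getElem?_eq_getElem (by omega : i.toNat < lst.length)]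
    simp
  · rw [PySem.List.pyGet?_of_nonneg lst (by omega)]
    rw [List.getElem?_eq_getElem (by omega : (i + 1).toNat < lst.length)]
    simp

-- the initial commons lst[0:2] is lst.take 2
theorem slice02 (lst : List Int) : PySem.List.slice lst (some 0) (some 2) = lst.take 2 := by
  rw [PySem.List.slice_toNat lst (by norm_num) (by norm_num)]
  simp

-- ===== VERDICT (by name: the statement is the Claim_ definition above) =====
theorem is_star_spec : Claim_equal_is_star := by
  intro lst _ hpre
  unfold Spec_is_star is_star is_star_alt
  by_cases hsmall : lst.length ≤ 2
  · have : lst.length = 0 ∨ lst.length = 2 := by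
      have := hpre
      unfold Pre_is_star at this
      omega
    rcases this with h0 | h2
    · obtain rfl : lst = [] := List.length_eq_zero_iff.mp h0
      decide
    · simp [h2]
  · rw [if_neg (by simp only [beq_iff_eq]; omega : ¬ ((lst.length == 2) = true)), if_neg hsmall]
    have hlen2 : (lst.take 2).length = 2 := by
      simp [List.length_take]
      omega
    rw [slice02]
    rw [isStarGo_eq lst _ _ (hidx_of_even lst hpre) (Or.inr hlen2)]
    rw [show altPairs lst = (PySem.List.pyRange 0 (lst.length) 2).map (pairAt lst) from rfl]
    set L := (PySem.List.pyRange 0 (lst.length) 2).map (pairAt lst) with hL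
    cases hany : L.any (fun p => p.1 == p.2) with
    | true =>
      have : L.all (fun p => !(p.1 == p.2)) = false := by
        simp only [List.all_eq_not_any_not, Bool.not_not]
        simp [hany]
      simp [this]
    | false =>
      have : L.all (fun p => !(p.1 == p.2)) = true := by
        simp only [List.all_eq_not_any_not, Bool.not_not]
        simp [hany]
      simp [this]
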